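-- pv_equiv track=rewrite | github.com/MrBrantCode/unitest_baseline | mut_generate/mist_train_cf/cf_79484/solution.py | rolling_max_min_indices
-- ===== SOURCE A (Python) =====
-- from typing import List, Tuple
--
-- def rolling_max_min_indices(numbers: List[int]) -> List[Tuple[Tuple[int, int], Tuple[int, int]]]:
--     if not numbers:
--         return []
--
--     current_max = current_min = numbers[0]
--     max_index = min_index = 0
--     result = []
--
--     for i, num in enumerate(numbers):
--         if num > current_max:
--             current_max = num
--             max_index = i
--         if num < current_min:
--             current_min = num
--             min_index = i
--         result.append(((current_max, max_index), (current_min, min_index)))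
--
--     return result
-- ===== SOURCE B (Python) =====
-- from typing import List, Tuple
--
-- def rolling_max_min_indices(numbers: List[int]) -> List[Tuple[Tuple[int, int], Tuple[int, int]]]:
--     result = []
--     for i in range(len(numbers)):
--         prefix = numbers[:i + 1]
--         hi = max(prefix)
--         lo = min(prefix)
--         result.append(((hi, prefix.index(hi)), (lo, prefix.index(lo))))
--     return result
-- ===== Notes on version B (the rewrite author's own statement) =====
-- stated objective: alternative
-- what changed: B drops A's running max/min state entirely: for each index it recomputes the prefix numbers[:i+1] and takes max/min with their first occurrence via list.index, trading A's O(n) stateful scan for a stateless O(n^2) per-prefix specification.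
import Mathlib
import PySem

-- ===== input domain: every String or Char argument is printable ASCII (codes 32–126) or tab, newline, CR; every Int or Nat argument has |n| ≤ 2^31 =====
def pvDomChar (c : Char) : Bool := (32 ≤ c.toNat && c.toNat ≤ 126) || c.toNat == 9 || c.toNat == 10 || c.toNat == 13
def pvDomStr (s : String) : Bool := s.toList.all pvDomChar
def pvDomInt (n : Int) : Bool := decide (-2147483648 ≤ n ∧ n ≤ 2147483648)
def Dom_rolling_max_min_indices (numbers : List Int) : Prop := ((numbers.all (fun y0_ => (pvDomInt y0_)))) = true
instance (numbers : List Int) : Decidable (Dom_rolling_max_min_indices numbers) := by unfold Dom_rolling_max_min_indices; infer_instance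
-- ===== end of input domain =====

-- B drops A's running max/min state: it recomputes each prefix's max/min and their first
-- occurrence per index (stateless per-prefix recomputation, O(n^2); objective: alternative).

-- ===== PORT A =====
-- A's loop state: ((current_max, max_index), (current_min, min_index)) plus the growing
-- result list; the body mirrors the two ifs and the append.
def rolling_max_min_indices (numbers : List Int) : List ((Int × Int) × (Int × Int)) :=
  match numbers with
  | [] => []
  | x :: _ =>
    let fin := (PySem.List.enumerate numbers).foldl
      (fun (st : ((Int × Int) × (Int × Int)) × List ((Int × Int) × (Int × Int)))
           (p : Int × Int) =>
        let s := st.1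
        let m := if p.2 > s.1.1 then (p.2, p.1) else s.1
        let n := if p.2 < s.2.1 then (p.2, p.1) else s.2
        ((m, n), st.2 ++ [(m, n)]))
      (((x, 0), (x, 0)), [])
    fin.2

-- ===== PORT B =====
-- Source B: for i in range(len(numbers)): prefix = numbers[:i+1]; hi, lo = max(prefix), min(prefix);
-- append ((hi, prefix.index(hi)), (lo, prefix.index(lo))).  max/min/index are the PySem
-- primitives; the wildcard match arm is unreachable (the prefix is never empty).
def rolling_max_min_indices_alt (numbers : List Int) : List ((Int × Int) × (Int × Int)) :=
  (PySem.List.pyRange 0 (numbers.length : Int) 1).foldl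
    (fun res i =>
      let pre := PySem.List.slice numbers none (some (i + 1))
      match PySem.List.max? pre (fun y => y), PySem.List.min? pre (fun y => y) with
      | some hi, some lo =>
          res ++ [((hi, (((PySem.List.index? pre hi).getD 0 : Nat) : Int)),
                   (lo, (((PySem.List.index? pre lo).getD 0 : Nat) : Int)))]
      | _, _ => res)
    []

-- ===== PRECONDITION & SPEC =====
def Spec_rolling_max_min_indices (numbers : List Int) (out : List ((Int × Int) × (Int × Int))) : Prop := out = rolling_max_min_indices_alt numbers
instance (numbers : List Int) (out : List ((Int × Int) × (Int × Int))) : Decidable (Spec_rolling_max_min_indices numbers out) := by unfold Spec_rolling_max_min_indices; infer_instance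

-- ===== CLAIM =====
def Claim_equal_rolling_max_min_indices : Prop := ∀ (numbers : List Int), Dom_rolling_max_min_indices numbers → Spec_rolling_max_min_indices numbers (rolling_max_min_indices numbers)

-- ===== LEMMAS AND PROOFS =====

-- A's per-element state update (max then min), extracted for the proofs.
def rmmStep (s : (Int × Int) × (Int × Int)) (p : Int × Int) : (Int × Int) × (Int × Int) :=
  (if p.2 > s.1.1 then (p.2, p.1) else s.1,
   if p.2 < s.2.1 then (p.2, p.1) else s.2)

-- final state and list of successive states of A's loop
def runA (l : List (Int × Int)) (s : (Int × Int) × (Int × Int)) :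
    (((Int × Int) × (Int × Int)) × List ((Int × Int) × (Int × Int))) :=
  match l with
  | [] => (s, [])
  | p :: l' =>
    let s' := rmmStep s p
    let r := runA l' s'
    (r.1, s' :: r.2)

-- the per-prefix entry B computes: (max, first index of max), (min, first index of min)
def entry (p : List Int) : (Int × Int) × (Int × Int) :=
  match p with
  | [] => ((0, 0), (0, 0))
  | x :: t =>
      ((t.foldl max x, (((PySem.List.index? (x :: t) (t.foldl max x)).getD 0 : Nat) : Int)),
       (t.foldl min x, (((PySem.List.index? (x :: t) (t.foldl min x)).getD 0 : Nat) : Int)))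

theorem A_fold_eq (l : List (Int × Int)) (s : (Int × Int) × (Int × Int))
    (acc : List ((Int × Int) × (Int × Int))) :
    l.foldl
      (fun (st : ((Int × Int) × (Int × Int)) × List ((Int × Int) × (Int × Int)))
           (p : Int × Int) =>
        let s := st.1
        let m := if p.2 > s.1.1 then (p.2, p.1) else s.1
        let n := if p.2 < s.2.1 then (p.2, p.1) else s.2
        ((m, n), st.2 ++ [(m, n)]))
      (s, acc) = ((runA l s).1, acc ++ (runA l s).2) := by
  induction l generalizing s acc with
  | nil => simp [runA]
  | cons p l ih => simp [runA, List.foldl_cons, ih, rmmStep]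

theorem runA_append (l : List (Int × Int)) (p : Int × Int) (s : (Int × Int) × (Int × Int)) :
    runA (l ++ [p]) s =
      (rmmStep (runA l s).1 p, (runA l s).2 ++ [rmmStep (runA l s).1 p]) := by
  induction l generalizing s with
  | nil => simp [runA]
  | cons q l ih => simp [runA, ih]

-- the crux: one A-step from the entry of q is the entry of q ++ [y]
theorem entry_step (x : Int) (t : List Int) (y : Int) :
    rmmStep (entry (x :: t)) (((x :: t).length : Int), y) = entry ((x :: t) ++ [y]) := by
  have hmax := PySem.List.le_foldl_max t x
  have hmin := PySem.List.foldl_min_le t x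
  have hM : (t ++ [y]).foldl max x = max (t.foldl max x) y := by
    rw [List.foldl_append]; rfl
  have hN : (t ++ [y]).foldl min x = min (t.foldl min x) y := by
    rw [List.foldl_append]; rfl
  have hMmem : t.foldl max x ∈ x :: t := by
    rcases PySem.List.foldl_max_mem t x with h | h
    · rw [h]; exact List.mem_cons_self
    · exact List.mem_cons_of_mem _ h
  have hNmem : t.foldl min x ∈ x :: t := by
    rcases PySem.List.foldl_min_mem t x with h | h
    · rw [h]; exact List.mem_cons_self
    · exact List.mem_cons_of_mem _ h
  have hidxM : PySem.List.index? (x :: (t ++ [y])) ((t ++ [y]).foldl max x) =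
      (if t.foldl max x < y then some (x :: t).length
       else PySem.List.index? (x :: t) (t.foldl max x)) := by
    rw [← List.cons_append]
    by_cases hy : t.foldl max x < y
    · rw [if_pos hy, hM, show max (t.foldl max x) y = y from by omega]
      refine PySem.List.index?_append_singleton_self (x :: t) y ?_
      intro hmem
      rcases List.mem_cons.mp hmem with h | h
      · have := hmax.1; omega
      · have := hmax.2 y h; omega
    · rw [if_neg hy, hM, show max (t.foldl max x) y = t.foldl max x from by omega]
      exact PySem.List.index?_append_of_mem _ hMmem
  have hidxN : PySem.List.index? (x :: (t ++ [y])) ((t ++ [y]).foldl min x) =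
      (if y < t.foldl min x then some (x :: t).length
       else PySem.List.index? (x :: t) (t.foldl min x)) := by
    rw [← List.cons_append]
    by_cases hy : y < t.foldl min x
    · rw [if_pos hy, hN, show min (t.foldl min x) y = y from by omega]
      refine PySem.List.index?_append_singleton_self (x :: t) y ?_
      intro hmem
      rcases List.mem_cons.mp hmem with h | h
      · have := hmin.1; omega
      · have := hmin.2 y h; omega
    · rw [if_neg hy, hN, show min (t.foldl min x) y = t.foldl min x from by omega]
      exact PySem.List.index?_append_of_mem _ hNmem
  rw [List.cons_append]
  simp only [entry, rmmStep]
  rw [hidxM, hidxN, hM, hN]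
  by_cases hy1 : t.foldl max x < y <;> by_cases hy2 : y < t.foldl min x
  · simp [hy1, hy2, show max (t.foldl max x) y = y from by omega,
      show min (t.foldl min x) y = y from by omega]
  · simp [hy1, hy2, show max (t.foldl max x) y = y from by omega,
      show min (t.foldl min x) y = t.foldl min x from by omega]
  · simp [hy1, hy2, show max (t.foldl max x) y = t.foldl max x from by omega,
      show min (t.foldl min x) y = y from by omega]
  · simp [hy1, hy2, show max (t.foldl max x) y = t.foldl max x from by omega,
      show min (t.foldl min x) y = t.foldl min x from by omega]

theorem runA_entry (x : Int) (t : List Int) :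
    runA (PySem.List.enumerate (x :: t)) ((x, 0), (x, 0)) =
      (entry (x :: t),
       (List.range (x :: t).length).map (fun k => entry ((x :: t).take (k + 1)))) := by
  induction t using List.reverseRecOn with
  | nil =>
      simp [PySem.List.enumerate_cons, PySem.List.enumerate_nil, runA, rmmStep, entry,
        List.range_succ]
  | append_singleton t y ih =>
      have henum : PySem.List.enumerate (x :: (t ++ [y])) =
          PySem.List.enumerate (x :: t) ++ [(((x :: t).length : Int), y)] := by
        rw [show x :: (t ++ [y]) = (x :: t) ++ [y] from by simp,
          PySem.List.enumerate_append]
        simp [PySem.List.enumerate_cons, PySem.List.enumerate_nil]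
      rw [henum, runA_append, ih]
      refine Prod.ext ?_ ?_
      · simpa using entry_step x t y
      · simp only []
        rw [show (x :: (t ++ [y])).length = (x :: t).length + 1 from by simp,
          List.range_succ, List.map_append]
        congr 1
        · refine List.map_congr_left ?_
          intro k hk
          rw [List.mem_range] at hk
          rw [show (x :: (t ++ [y])).take (k + 1) = ((x :: t) ++ [y]).take (k + 1) from by simp,
            List.take_append_of_le_length (by simpa using hk)]
        · have htake : List.take ((x :: t).length + 1) (x :: (t ++ [y])) = x :: (t ++ [y]) :=
            List.take_of_length_le (by simp)
          simp only [List.map_cons, List.map_nil, htake]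
          simpa using entry_step x t y

theorem alt_eq_map (numbers : List Int) :
    rolling_max_min_indices_alt numbers =
      (List.range numbers.length).map (fun k => entry (numbers.take (k + 1))) := by
  unfold rolling_max_min_indices_alt
  rw [PySem.List.pyRange_one, List.foldl_map]
  simp only [Int.sub_zero, Int.toNat_natCast]
  refine Eq.trans (PySem.List.foldl_congr_mem _ _
      (fun acc (k : Nat) => acc ++ [entry (numbers.take (k + 1))]) _ ?_) ?_
  · intro acc k hk
    rw [List.mem_range] at hk
    have hslice : PySem.List.slice numbers none (some ((0:Int) + (k:Int) + 1)) =
        numbers.take (k + 1) := by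
      rw [show (0:Int) + (k:Int) + 1 = ((k + 1 : Nat) : Int) from by push_cast; ring]
      exact PySem.List.slice_to_natCast numbers (k + 1)
    simp only [hslice]
    obtain ⟨hd, tl, rfl⟩ : ∃ hd tl, numbers = hd :: tl := by
      cases numbers with
      | nil => simp at hk
      | cons a b => exact ⟨a, b, rfl⟩
    simp only [List.take_succ_cons]
    rw [PySem.List.max?_id_cons, PySem.List.min?_id_cons]
    simp [entry]
  · simpa using PySem.List.foldl_append_singleton_eq_map
      (l := List.range numbers.length)
      (f := fun k => entry (numbers.take (k + 1))) (acc := [])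

-- ===== VERDICT =====
theorem rolling_max_min_indices_spec : Claim_equal_rolling_max_min_indices := by
  intro numbers _
  unfold Spec_rolling_max_min_indices
  rw [alt_eq_map]
  cases numbers with
  | nil => rfl
  | cons x xs =>
      show (rolling_max_min_indices (x :: xs)) = _
      unfold rolling_max_min_indices
      simp only []
      rw [A_fold_eq, runA_entry]
      simp
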